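-- pv_equiv track=rewrite | github.com/BoilerHAUS/moltch | scripts/ops/validate_decision_parity.py | classify_mismatch
-- ===== SOURCE A (Python) =====
-- REQUIRED_KEYS = {
--     "decision_id",
--     "correlation_id",
--     "lineage_id",
--     "from_state",
--     "to_state",
--     "result",
--     "reason_code",
--     "lane",
--     "risk_class",
-- }
--
-- def classify_mismatch(offchain, onchain):
--     missing = sorted([key for key in REQUIRED_KEYS if key not in offchain or key not in onchain])
--     if missing:
--         return "missing_required_field", {"missing_keys": missing}
--     if offchain["decision_id"] != onchain["decision_id"] or offchain["correlation_id"] != onchain["correlation_id"] or offchain["lineage_id"] != onchain["lineage_id"]: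
--         return "lineage_correlation_mismatch", {}
--     if offchain["from_state"] != onchain["from_state"] or offchain["to_state"] != onchain["to_state"]:
--         return "state_transition_mismatch", {}
--     if offchain["result"] != onchain["result"] or offchain["reason_code"] != onchain["reason_code"]:
--         return "verdict_reason_mismatch", {}
--     if offchain["lane"] != onchain["lane"] or offchain["risk_class"] != onchain["risk_class"]:
--         return "lane_risk_mismatch", {}
--     return None, {}
-- ===== SOURCE B (Python) =====
-- REQUIRED_KEYS = {
--     "decision_id",
--     "correlation_id",
--     "lineage_id",
--     "from_state",
--     "to_state",
--     "result",
--     "reason_code",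
--     "lane",
--     "risk_class",
-- }
--
-- LABELS = [
--     "lineage_correlation_mismatch",
--     "state_transition_mismatch",
--     "verdict_reason_mismatch",
--     "lane_risk_mismatch",
-- ]
--
-- KEY_PRIORITY = {
--     "decision_id": 0,
--     "correlation_id": 0,
--     "lineage_id": 0,
--     "from_state": 1,
--     "to_state": 1,
--     "result": 2,
--     "reason_code": 2,
--     "lane": 3,
--     "risk_class": 3,
-- }
--
-- def classify_mismatch(offchain, onchain):
--     missing = sorted(REQUIRED_KEYS - (offchain.keys() & onchain.keys()))
--     if missing:
--         return "missing_required_field", {"missing_keys": missing}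
--     ranks = [rank for key, rank in KEY_PRIORITY.items() if offchain[key] != onchain[key]]
--     if ranks:
--         return LABELS[min(ranks)], {}
--     return None, {}
-- ===== Notes on version B (the rewrite author's own statement) =====
-- stated objective: alternative
-- what changed: Instead of A's ordered chain of short-circuiting group comparisons, B computes the missing keys by set difference against the key intersection, then in one pass collects the priority rank of every differing key and maps the minimum rank through a label table; A scans group by group and returns early.
import Mathlib
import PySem

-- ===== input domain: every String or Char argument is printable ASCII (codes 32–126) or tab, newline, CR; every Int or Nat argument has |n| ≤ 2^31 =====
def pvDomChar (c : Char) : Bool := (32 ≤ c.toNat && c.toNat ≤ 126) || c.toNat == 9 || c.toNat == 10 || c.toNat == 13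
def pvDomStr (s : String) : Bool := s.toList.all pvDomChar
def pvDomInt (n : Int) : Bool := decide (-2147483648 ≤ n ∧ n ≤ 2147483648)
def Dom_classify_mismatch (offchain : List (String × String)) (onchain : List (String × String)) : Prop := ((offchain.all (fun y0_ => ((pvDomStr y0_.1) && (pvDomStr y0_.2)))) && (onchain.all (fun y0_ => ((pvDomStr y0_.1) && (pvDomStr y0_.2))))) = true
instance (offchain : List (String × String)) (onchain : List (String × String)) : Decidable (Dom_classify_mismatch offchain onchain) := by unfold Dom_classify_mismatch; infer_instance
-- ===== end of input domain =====

-- B replaces A's ordered chain of short-circuiting group comparison blocks by: collect the priority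
-- rank of every differing key in one pass, take the minimum, and index a label table (objective: alternative).

-- ===== PORT A =====
-- REQUIRED_KEYS (a Python set; its iteration order is irrelevant here because the comprehension result is sorted)
def pvRequiredKeys : List String :=
  ["decision_id", "correlation_id", "lineage_id", "from_state", "to_state",
   "result", "reason_code", "lane", "risk_class"]

def classify_mismatch (offchain : List (String × String)) (onchain : List (String × String)) : Option String × (List (String × List String)) :=
  let doff : PySem.Dict String String := PySem.Dict.mk offchain
  let don : PySem.Dict String String := PySem.Dict.mk onchain
  let missing := PySem.List.sorted (pvRequiredKeys.filter (fun k => !(doff.contains k) || !(don.contains k))) (fun x => x) false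
  if missing ≠ [] then (some "missing_required_field", [("missing_keys", missing)])
  else if (doff.get? "decision_id" != don.get? "decision_id") || (doff.get? "correlation_id" != don.get? "correlation_id") || (doff.get? "lineage_id" != don.get? "lineage_id") then
    (some "lineage_correlation_mismatch", [])
  else if (doff.get? "from_state" != don.get? "from_state") || (doff.get? "to_state" != don.get? "to_state") then
    (some "state_transition_mismatch", [])
  else if (doff.get? "result" != don.get? "result") || (doff.get? "reason_code" != don.get? "reason_code") then
    (some "verdict_reason_mismatch", [])
  else if (doff.get? "lane" != don.get? "lane") || (doff.get? "risk_class" != don.get? "risk_class") then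
    (some "lane_risk_mismatch", [])
  else (none, [])

-- ===== PORT B =====
def pvLabels : List String :=
  ["lineage_correlation_mismatch", "state_transition_mismatch",
   "verdict_reason_mismatch", "lane_risk_mismatch"]

-- KEY_PRIORITY as an association list in insertion order
def pvKeyPriority : List (String × Int) :=
  [("decision_id", 0), ("correlation_id", 0), ("lineage_id", 0),
   ("from_state", 1), ("to_state", 1),
   ("result", 2), ("reason_code", 2),
   ("lane", 3), ("risk_class", 3)]

-- the 'ranks' comprehension of Source B
def pvRanks (doff don : PySem.Dict String String) : List Int :=
  (pvKeyPriority.filter (fun kp => doff.get? kp.1 != don.get? kp.1)).map (·.2)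

def classify_mismatch_alt (offchain : List (String × String)) (onchain : List (String × String)) : Option String × (List (String × List String)) :=
  let doff : PySem.Dict String String := PySem.Dict.mk offchain
  let don : PySem.Dict String String := PySem.Dict.mk onchain
  let present : List String := doff.keys.filter (fun k => don.contains k)   -- offchain.keys() & onchain.keys()
  let missing := PySem.List.sorted (pvRequiredKeys.filter (fun k => !(present.contains k))) (fun x => x) false   -- REQUIRED_KEYS - present, sorted
  if missing ≠ [] then (some "missing_required_field", [("missing_keys", missing)])
  else
    let ranks := pvRanks doff don
    if ranks.isEmpty then (none, [])
    else
      match PySem.List.min? ranks (fun x => x) with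
      | some m => (PySem.List.pyGet? pvLabels m, [])   -- LABELS[min(ranks)]; pyGet? = none is IndexError, unreachable (m ∈ {0,1,2,3})
      | none => (none, [])                             -- unreachable: ranks is nonempty here

-- ===== PRECONDITION & SPEC =====
def Spec_classify_mismatch (offchain : List (String × String)) (onchain : List (String × String)) (out : Option String × (List (String × List String))) : Prop := out = classify_mismatch_alt offchain onchain
instance (offchain : List (String × String)) (onchain : List (String × String)) (out : Option String × (List (String × List String))) : Decidable (Spec_classify_mismatch offchain onchain out) := by unfold Spec_classify_mismatch; infer_instance

-- ===== CLAIM (what is proved, stated in full; the proofs are below) =====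
def Claim_equal_classify_mismatch : Prop := ∀ (offchain : List (String × String)) (onchain : List (String × String)), Dom_classify_mismatch offchain onchain → Spec_classify_mismatch offchain onchain (classify_mismatch offchain onchain)

-- ===== LEMMAS AND PROOFS =====

-- the two 'missing' filters coincide pointwise
theorem pv_missing_pred_eq (doff don : PySem.Dict String String) (k : String) :
    (!(doff.contains k) || !(don.contains k))
      = (!((doff.keys.filter (fun k => don.contains k)).contains k)) := by
  by_cases h1 : k ∈ doff.keys <;> by_cases h2 : k ∈ don.keys <;>
    simp [PySem.Dict.contains_eq_decide_mem_keys, List.mem_filter, h1, h2]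

-- ===== VERDICT (by name: the statement is the Claim_ definition above) =====
theorem classify_mismatch_spec : Claim_equal_classify_mismatch := by
  intro offchain onchain _
  unfold Spec_classify_mismatch classify_mismatch classify_mismatch_alt
  simp only []
  rw [show (pvRequiredKeys.filter (fun k => !((PySem.Dict.mk offchain).contains k) || !((PySem.Dict.mk onchain).contains k)))
        = (pvRequiredKeys.filter (fun k => !(((PySem.Dict.mk offchain).keys.filter (fun k => (PySem.Dict.mk onchain).contains k)).contains k)))
      from List.filter_congr (fun k _ => pv_missing_pred_eq _ _ k)]
  set M := PySem.List.sorted (pvRequiredKeys.filter (fun k => !(((PySem.Dict.mk offchain).keys.filter (fun k => (PySem.Dict.mk onchain).contains k)).contains k))) (fun x => x) false with hM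
  by_cases hmiss : M = []
  · have hne : ¬(M ≠ []) := by simp [hmiss]
    rw [if_neg hne, if_neg hne]
    simp only [pvRanks, pvKeyPriority, List.filter_cons, List.filter_nil]
    generalize ((PySem.Dict.mk offchain).get? "decision_id" != (PySem.Dict.mk onchain).get? "decision_id") = a
    generalize ((PySem.Dict.mk offchain).get? "correlation_id" != (PySem.Dict.mk onchain).get? "correlation_id") = b
    generalize ((PySem.Dict.mk offchain).get? "lineage_id" != (PySem.Dict.mk onchain).get? "lineage_id") = c
    generalize ((PySem.Dict.mk offchain).get? "from_state" != (PySem.Dict.mk onchain).get? "from_state") = d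
    generalize ((PySem.Dict.mk offchain).get? "to_state" != (PySem.Dict.mk onchain).get? "to_state") = e
    generalize ((PySem.Dict.mk offchain).get? "result" != (PySem.Dict.mk onchain).get? "result") = f
    generalize ((PySem.Dict.mk offchain).get? "reason_code" != (PySem.Dict.mk onchain).get? "reason_code") = g
    generalize ((PySem.Dict.mk offchain).get? "lane" != (PySem.Dict.mk onchain).get? "lane") = h
    generalize ((PySem.Dict.mk offchain).get? "risk_class" != (PySem.Dict.mk onchain).get? "risk_class") = i
    revert a b c d e f g h i
    decide
  · rw [if_pos hmiss, if_pos hmiss]
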